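-- pv_equiv track=rewrite | github.com/blkdev02/UTAx-CSE1309x | uta week 7.py | check
-- ===== SOURCE A (Python) =====
-- def check(lst, lst1):
--     count_row = 0
--     count_column = 0
--     a = None
--     for i in range(0, len(lst[0])):
--         for j in lst:
--             a = j
--         count_column += 1
--     count_row = len(lst1[1])
--
--     if count_row == count_column:
--         return True
--
--     else:
--         return False
-- ===== SOURCE B (Python) =====
-- def check(lst, lst1):
--     return len(lst[0]) == len(lst1[1])
-- ===== Notes on version B (the rewrite author's own statement) =====
-- stated objective: simpler
-- what changed: Replaces A's nested counting loops (which count one per column of lst[0] while uselessly scanning rows) with a direct length comparison len(lst[0]) == len(lst1[1]).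
import Mathlib
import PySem

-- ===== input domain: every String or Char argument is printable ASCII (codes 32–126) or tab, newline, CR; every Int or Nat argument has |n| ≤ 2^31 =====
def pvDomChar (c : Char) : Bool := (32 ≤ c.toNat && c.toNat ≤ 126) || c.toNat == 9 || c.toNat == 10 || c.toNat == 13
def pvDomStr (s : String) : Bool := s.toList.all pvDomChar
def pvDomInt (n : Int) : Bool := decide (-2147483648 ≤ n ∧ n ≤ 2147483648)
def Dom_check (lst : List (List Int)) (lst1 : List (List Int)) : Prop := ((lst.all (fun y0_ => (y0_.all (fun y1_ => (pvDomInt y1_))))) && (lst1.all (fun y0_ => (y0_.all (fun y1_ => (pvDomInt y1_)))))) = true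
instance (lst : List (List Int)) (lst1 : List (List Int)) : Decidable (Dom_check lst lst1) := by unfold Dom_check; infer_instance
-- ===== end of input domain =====

-- B replaces A's nested counting loops with a direct length comparison (simpler).


-- ===== PORT A =====
-- literal transliteration of A: the outer loop runs over range(0, len(lst[0])),
-- the inner loop repeatedly reassigns a := j (dead state, kept), count_column += 1 each outer step;
-- count_row = len(lst1[1]); return count_row == count_column.
-- lst[0] and lst1[1] use pyGet? (none = IndexError, excluded by Pre_check; the `false` arms are unreachable under Pre_).
def check (lst : List (List Int)) (lst1 : List (List Int)) : Bool :=
  match PySem.List.pyGet? lst 0 with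
  | none => false
  | some r0 =>
    let st := (PySem.List.pyRange 0 (Int.ofNat r0.length) 1).foldl
      (fun (st : Int × Option (List Int)) _i =>
        let a := lst.foldl (fun (a : Option (List Int)) j => some j) st.2
        (st.1 + 1, a)) (0, none)
    match PySem.List.pyGet? lst1 1 with
    | none => false
    | some r1 =>
      let count_row : Int := Int.ofNat r1.length
      if count_row == st.1 then true else false

-- ===== PORT B =====
def check_alt (lst : List (List Int)) (lst1 : List (List Int)) : Bool :=
  match PySem.List.pyGet? lst 0, PySem.List.pyGet? lst1 1 with
  | some r0, some r1 => decide (r0.length = r1.length)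
  | _, _ => false

-- ===== PRECONDITION & SPEC =====
-- A raises IndexError when lst is empty (lst[0]) or lst1 has fewer than two rows (lst1[1]); Pre_ excludes exactly those.
def Pre_check (lst : List (List Int)) (lst1 : List (List Int)) : Prop := lst ≠ [] ∧ 2 ≤ lst1.length
instance (lst : List (List Int)) (lst1 : List (List Int)) : Decidable (Pre_check lst lst1) := by unfold Pre_check; infer_instance
def pvWitness_check : List (List Int) × List (List Int) := ([[1, 2]], [[3], [4, 5]])
def Spec_check (lst : List (List Int)) (lst1 : List (List Int)) (out : Bool) : Prop := out = check_alt lst lst1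
instance (lst : List (List Int)) (lst1 : List (List Int)) (out : Bool) : Decidable (Spec_check lst lst1 out) := by unfold Spec_check; infer_instance

-- ===== CLAIM (what is proved, stated in full; the proofs are below) =====
def Claim_equal_check : Prop := ∀ (lst : List (List Int)) (lst1 : List (List Int)), Dom_check lst lst1 → Pre_check lst lst1 → Spec_check lst lst1 (check lst lst1)

-- ===== LEMMAS AND PROOFS =====

-- the fold over pyRange 0 n 1 just adds 1 per element; its first component is n
lemma foldl_count (l : List Int) (lst : List (List Int)) (c : Int) (a : Option (List Int)) :
    (l.foldl (fun (st : Int × Option (List Int)) _i =>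
        let a := lst.foldl (fun (a : Option (List Int)) j => some j) st.2
        (st.1 + 1, a)) (c, a)).1 = c + l.length := by
  induction l generalizing c a with
  | nil => simp
  | cons x xs ih => simp [List.foldl, ih]; omega

-- ===== VERDICT (by name: the statement is the Claim_ definition above) =====
theorem check_spec : Claim_equal_check := by
  intro lst lst1 _dom pre
  obtain ⟨hne, hlen⟩ := pre
  unfold Spec_check check check_alt
  obtain ⟨r0, hr0⟩ : ∃ r0, PySem.List.pyGet? lst 0 = some r0 := by
    cases lst with
    | nil => exact absurd rfl hne
    | cons x xs => exact ⟨x, by simp [PySem.List.pyGet?, PySem.List.pyIdx?]⟩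
  obtain ⟨r1, hr1⟩ : ∃ r1, PySem.List.pyGet? lst1 1 = some r1 := by
    match lst1, hlen with
    | x :: y :: ys, _ => exact ⟨y, by simp [PySem.List.pyGet?, PySem.List.pyIdx?]⟩
  rw [hr0, hr1]
  simp only []
  rw [foldl_count]
  simp [PySem.List.pyRange]
  omega
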